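-- pv_equiv track=rewrite | github.com/likai945/termux-prc | leazygroups_ultimate.py | predo_it
-- ===== SOURCE A (Python) =====
-- def fmt_string(lst):
--     ctns=0
--     last='88888'
--     string=''
--     lst.append(lst[-1])
--     for i in lst:
--         if int(i)==int(last)+1:
--             ctns+=1
--             end=i
--         else:
--             if ctns==1:
--                 string+=f'{last},'
--             elif ctns>1:
--                 string+=f'{start}-{end},'
--
--             ctns=1
--             start=i
--         last=i
--
--     string=string.rstrip(',')
--     return string
--
-- def init_list(hList,pI,sI,m):
--     dct={}
--     for host in hList:
--         mI=host.index('-',30,31) if m==1 else 0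
--         prefix=host[:mI+pI]
--         root=host[mI+pI:mI+sI]
--         suffix=host[sI+mI:]
--         key=(prefix,suffix)
--         dct.setdefault(key,[])
--         dct[key].append(root)
--
--     return dct
--
-- def predo_it(lst,pI,sI,m):
--     hostDict=init_list(lst,pI,sI,m)
--     groupList=[]
--     dList=list(hostDict)
--     dList.sort()
--
--     for host in dList:
--         numList=hostDict[host]
--         if len(numList)==1:
--             fmtHName=host[0]+numList[0]+host[1]
--         else:
--             batchHName=f'[{fmt_string(numList)}]'
--             fmtHName=f'{host[0]}{batchHName}{host[1]}'
--         groupList.append(fmtHName)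
--
--     return groupList
-- ===== SOURCE B (Python) =====
-- def predo_it(lst, pI, sI, m):
--     buckets = {}
--     for host in lst:
--         mI = host.index('-', 30, 31) if m == 1 else 0
--         key = (host[:mI + pI], host[sI + mI:])
--         buckets[key] = buckets.get(key, []) + [host[mI + pI:mI + sI]]
--
--     out = []
--     for key in sorted(buckets):
--         roots = buckets[key]
--         if len(roots) == 1:
--             out.append(key[0] + roots[0] + key[1])
--         else:
--             runs = []
--             for r in roots:
--                 if runs and int(r) == int(runs[-1][-1]) + 1:
--                     runs[-1].append(r)
--                 else:
--                     runs.append([r])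
--             body = ','.join(r[0] if len(r) == 1 else f'{r[0]}-{r[-1]}' for r in runs)
--             out.append(f'{key[0]}[{body}]{key[1]}')
--     return out
-- ===== Notes on version B (the rewrite author's own statement) =====
-- stated objective: alternative
-- what changed: The range-compression is rewritten from fmt_string's sentinel-append single-pass flush state machine (last='88888', trailing rstrip of commas) into two passes: partition the roots into maximal runs of consecutive ints, then format each run and ','.join them; the bucketing keeps the same dict grouping but via buckets.get(key,[])+[root] and the output loop is a comprehension-style map over sorted keys.
-- outside the precondition, e.g. on predo_it(['88889', '5'], 0, 5, 0): A returns ['[88889,5]'], B returns ['[88889,5]']; on predo_it(['88889', '88890'], 0, 5, 0): A raises UnboundLocalError, B returns ['[88889-88890]']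
import Mathlib
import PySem

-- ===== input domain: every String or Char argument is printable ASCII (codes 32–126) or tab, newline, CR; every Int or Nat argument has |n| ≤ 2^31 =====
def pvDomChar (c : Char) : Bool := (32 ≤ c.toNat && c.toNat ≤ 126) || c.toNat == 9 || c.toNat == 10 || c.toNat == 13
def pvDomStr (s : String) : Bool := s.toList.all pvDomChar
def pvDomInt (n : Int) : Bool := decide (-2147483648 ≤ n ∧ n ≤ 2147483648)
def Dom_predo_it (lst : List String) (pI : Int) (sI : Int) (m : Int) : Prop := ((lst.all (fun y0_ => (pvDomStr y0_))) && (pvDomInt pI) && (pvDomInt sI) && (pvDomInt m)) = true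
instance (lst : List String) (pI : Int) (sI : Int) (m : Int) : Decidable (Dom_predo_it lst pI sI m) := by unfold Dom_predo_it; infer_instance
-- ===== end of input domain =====

-- B replaces fmt_string's sentinel-append flush state machine by partition-into-consecutive-runs then a
-- formatting pass (objective: alternative decomposition, same cost); equality of RETURN values is proved
-- (A mutates only its own internal dict lists, nothing caller-visible).

-- int(s): exact whenever the parse succeeds (Pre_ guarantees it on every string this is applied to; '88888' parses)
def pvInt (s : String) : Int := (PySem.Int.ofStr? s).getD 0

-- ===== PORT A =====
-- s.rstrip(','): hand port (PySem has no one-char rstrip); exact: drops trailing ','s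
def rstripCommas (s : String) : String := String.ofList ((s.toList.reverse.dropWhile (fun c => c == ',')).reverse)

-- the loop state of fmt_string: (ctns, last, string, start, end)
def fmtStep (st : Int × String × String × String × String) (i : String) : Int × String × String × String × String :=
  match st with
  | (ctns, last, string, start, end_) =>
    if pvInt i = pvInt last + 1 then
      (ctns + 1, i, string, start, i)
    else
      let string' := if ctns = 1 then string ++ last ++ ","
                     else if 1 < ctns then string ++ start ++ "-" ++ end_ ++ ","
                     else string
      (1, i, string', i, end_)

-- fmt_string(lst): loops over lst + [lst[-1]]; start/end begin as "" — they are never read before being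
-- assigned when the first value is not 88889, which Pre_ ensures; lst is nonempty at the call site
def fmt_stringA (lst : List String) : String :=
  rstripCommas ((lst ++ [lst.getLastD ""]).foldl fmtStep (0, "88888", "", "", "")).2.2.1

-- init_list's loop body; none = ValueError from host.index('-',30,31)
def initStepA (pI sI m : Int) (acc : Option (PySem.Dict (String × String) (List String))) (host : String) :
    Option (PySem.Dict (String × String) (List String)) :=
  match acc with
  | none => none
  | some dct =>
    let mI? : Option Int := if m = 1 then
        (let f := PySem.Str.findFrom host "-" 30 (some 31); if f = -1 then none else some f)
      else some 0
    match mI? with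
    | none => none
    | some mI =>
      let key := (PySem.Str.slice host none (some (mI + pI)), PySem.Str.slice host (some (sI + mI)) none)
      let root := PySem.Str.slice host (some (mI + pI)) (some (mI + sI))
      some ((dct.setdefault key []).modify key [] (fun l => l ++ [root]))

def init_listA (hList : List String) (pI sI m : Int) : Option (PySem.Dict (String × String) (List String)) :=
  hList.foldl (initStepA pI sI m) (some PySem.Dict.empty)

def predo_it (lst : List String) (pI : Int) (sI : Int) (m : Int) : List String :=
  match init_listA lst pI sI m with
  | none => []   -- unreachable under Pre_ (the Python raises ValueError)
  | some hostDict =>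
    let dList := PySem.List.sorted2 hostDict.keys (fun k => k.1) (fun k => k.2)
    dList.foldl (fun groupList host =>
      groupList ++
        [let numList := hostDict.getD host []   -- hostDict[host]: host ∈ keys by construction
         if numList.length = 1 then host.1 ++ numList.headD "" ++ host.2
         else
           let batchHName := "[" ++ fmt_stringA numList ++ "]"
           host.1 ++ batchHName ++ host.2]) []

-- ===== PORT B =====
-- Source B's bucketing loop body (buckets[key] = buckets.get(key, []) + [root]); none = ValueError from host.index
def bucketStepB (pI sI m : Int) (acc : Option (PySem.Dict (String × String) (List String))) (host : String) :
    Option (PySem.Dict (String × String) (List String)) :=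
  match acc with
  | none => none
  | some buckets =>
    let mI? : Option Int := if m = 1 then
        (let f := PySem.Str.findFrom host "-" 30 (some 31); if f = -1 then none else some f)
      else some 0
    match mI? with
    | none => none
    | some mI =>
      let key := (PySem.Str.slice host none (some (mI + pI)), PySem.Str.slice host (some (sI + mI)) none)
      some (buckets.modify key [] (fun l => l ++ [PySem.Str.slice host (some (mI + pI)) (some (mI + sI))]))

-- runs loop body: extend the last run when consecutive, else start a new one
def runStep (runs : List (List String)) (r : String) : List (List String) :=
  if runs ≠ [] ∧ pvInt r = pvInt ((runs.getLastD []).getLastD "") + 1 then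
    runs.dropLast ++ [(runs.getLastD []) ++ [r]]
  else runs ++ [[r]]

def fmtRun (run : List String) : String :=
  if run.length = 1 then run.headD "" else run.headD "" ++ "-" ++ run.getLastD ""

def predo_it_alt (lst : List String) (pI : Int) (sI : Int) (m : Int) : List String :=
  match lst.foldl (bucketStepB pI sI m) (some PySem.Dict.empty) with
  | none => []   -- unreachable under Pre_ (Source B raises ValueError there too)
  | some buckets =>
    (PySem.List.sorted2 buckets.keys (fun k => k.1) (fun k => k.2)).map (fun key =>
      let roots := buckets.getD key []
      if roots.length = 1 then key.1 ++ roots.headD "" ++ key.2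
      else
        let body := PySem.Str.join "," ((roots.foldl runStep []).map fmtRun)
        key.1 ++ "[" ++ body ++ "]" ++ key.2)

-- ===== PRECONDITION & SPEC =====
-- root is usable by fmt_string: int(root) succeeds and is not 88889.  The last two conjuncts (no ',' and
-- nonempty) are consequences of int() success, stated explicitly so Pre_ stays elementary.
def pvCond (r : String) : Prop :=
  (PySem.Int.ofStr? r).isSome ∧ PySem.Int.ofStr? r ≠ some 88889 ∧ ',' ∉ r.toList ∧ r ≠ ""

-- the key (prefix,suffix) and root substrings a host contributes (mI is 30 exactly when m = 1, under Pre_)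
def pvKey (pI sI m : Int) (h : String) : String × String :=
  (PySem.Str.slice h none (some ((if m = 1 then 30 else 0) + pI)),
   PySem.Str.slice h (some (sI + (if m = 1 then 30 else 0))) none)

def pvRoot (pI sI m : Int) (h : String) : String :=
  PySem.Str.slice h (some ((if m = 1 then 30 else 0) + pI)) (some ((if m = 1 then 30 else 0) + sI))

-- Pre_ excludes exactly: (a) with m=1, hosts without '-' at index 30 (host.index raises ValueError); (b) hosts
-- sharing their (prefix,suffix) key with a second host while their root substring is non-numeric (int() raises
-- ValueError) or has value 88889, where A's sentinel last='88888' treats the first root as a run continuation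
-- (UnboundLocalError when the next root is consecutive, otherwise an accidental result).
def Pre_predo_it (lst : List String) (pI : Int) (sI : Int) (m : Int) : Prop :=
  (m = 1 → ∀ host ∈ lst, PySem.Str.findFrom host "-" 30 (some 31) = 30) ∧
  (∀ host ∈ lst,
     2 ≤ (lst.filter (fun h => pvKey pI sI m h == pvKey pI sI m host)).length →
     pvCond (pvRoot pI sI m host))

instance (lst : List String) (pI : Int) (sI : Int) (m : Int) : Decidable (Pre_predo_it lst pI sI m) := by
  unfold Pre_predo_it pvCond pvKey pvRoot; infer_instance

def pvWitness_predo_it : List String × Int × Int × Int := (["hostaa1.x", "hostaa2.x", "hostbb9"], 6, 7, 0)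

def Spec_predo_it (lst : List String) (pI : Int) (sI : Int) (m : Int) (out : List String) : Prop := out = predo_it_alt lst pI sI m
instance (lst : List String) (pI : Int) (sI : Int) (m : Int) (out : List String) : Decidable (Spec_predo_it lst pI sI m out) := by unfold Spec_predo_it; infer_instance

-- ===== CLAIM (what is proved, stated in full; the proofs are below) =====
def Claim_equal_predo_it : Prop := ∀ (lst : List String) (pI : Int) (sI : Int) (m : Int), Dom_predo_it lst pI sI m → Pre_predo_it lst pI sI m → Spec_predo_it lst pI sI m (predo_it lst pI sI m)

-- ===== LEMMAS AND PROOFS =====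

theorem pv_witness_ok :
    Dom_predo_it pvWitness_predo_it.1 pvWitness_predo_it.2.1 pvWitness_predo_it.2.2.1 pvWitness_predo_it.2.2.2 ∧
    Pre_predo_it pvWitness_predo_it.1 pvWitness_predo_it.2.1 pvWitness_predo_it.2.2.1 pvWitness_predo_it.2.2.2 := by
  constructor <;> decide

-- ---- phase 1: the two bucketing loops build the same dict ----

-- dct.setdefault(k, []) followed by dct[k].append(r) is exactly d[k] = d.get(k, []) + [r]
theorem setdefault_modify {κ ν : Type} [BEq κ] [LawfulBEq κ] (d : PySem.Dict κ ν) (k : κ) (v : ν) (f : ν → ν) :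
    (d.setdefault k v).modify k v f = d.modify k v f := by
  unfold PySem.Dict.modify
  rw [PySem.Dict.getD_setdefault_self]
  by_cases h : d.contains k = true
  · rw [PySem.Dict.setdefault_of_contains d v h]
  · rw [PySem.Dict.setdefault_of_not_contains d v (by simpa using h), PySem.Dict.insert_insert_self]

theorem initStep_eq_bucketStep (pI sI m : Int) : initStepA pI sI m = bucketStepB pI sI m := by
  funext acc host
  unfold initStepA bucketStepB
  cases acc with
  | none => rfl
  | some dct => simp only [setdefault_modify]

theorem bucket_fold_some (pI sI m : Int) :
    ∀ (lst : List String) (d : PySem.Dict (String × String) (List String)),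
    (m = 1 → ∀ h ∈ lst, PySem.Str.findFrom h "-" 30 (some 31) = 30) →
    lst.foldl (bucketStepB pI sI m) (some d) =
      some (lst.foldl (fun d h => d.modify (pvKey pI sI m h) [] (fun l => l ++ [pvRoot pI sI m h])) d) := by
  intro lst
  induction lst with
  | nil => intro d _; rfl
  | cons a t ih =>
    intro d hm
    have hstep : bucketStepB pI sI m (some d) a =
        some (d.modify (pvKey pI sI m a) [] (fun l => l ++ [pvRoot pI sI m a])) := by
      unfold bucketStepB pvKey pvRoot
      by_cases h1 : m = 1
      · have h30 := hm h1 a (List.mem_cons_self)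
        simp only [PySem.Str.findFrom_eq] at h30
        have h30' : PySem.Chars.findFrom a.toList ['-'] 30 (some 31) = 30 := h30
        simp [h1, h30']
      · simp [h1]
    simp only [List.foldl_cons, hstep]
    exact ih _ (fun h1 h hh => hm h1 h (List.mem_cons_of_mem a hh))

theorem getD_bucket_fold (pI sI m : Int) (k : String × String) :
    ∀ (lst : List String) (d : PySem.Dict (String × String) (List String)),
    (lst.foldl (fun d h => d.modify (pvKey pI sI m h) [] (fun l => l ++ [pvRoot pI sI m h])) d).getD k [] =
      d.getD k [] ++ (lst.filter (fun h => pvKey pI sI m h == k)).map (pvRoot pI sI m) := by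
  intro lst
  induction lst with
  | nil => intro d; simp
  | cons a t ih =>
    intro d
    simp only [List.foldl_cons, List.filter_cons, ih]
    by_cases h : pvKey pI sI m a = k
    · subst h
      simp [PySem.Dict.getD_modify_self]
    · have hb : (pvKey pI sI m a == k) = false := by simpa using h
      rw [PySem.Dict.getD_modify, if_neg (fun hk => h hk.symm)]
      simp [hb]

-- ---- phase 2: fmt_string's flush state machine vs runs-then-format ----

def runsOf (l : List String) : List (List String) := l.foldl runStep []

def strOf (rs : List (List String)) : String := rs.foldl (fun s run => s ++ fmtRun run ++ ",") ""

theorem runsOf_concat (l : List String) (i : String) : runsOf (l ++ [i]) = runStep (runsOf l) i := by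
  simp [runsOf, List.foldl_append]

theorem strOf_concat (rs : List (List String)) (run : List String) :
    strOf (rs ++ [run]) = strOf rs ++ fmtRun run ++ "," := by
  simp [strOf, List.foldl_append]

theorem runs_shape (l : List String) :
    ∀ run ∈ runsOf l, run ≠ [] ∧ ∀ r ∈ run, r ∈ l := by
  induction l using List.reverseRecOn with
  | nil => intro run h; simp [runsOf] at h
  | append_singleton l i ih =>
    intro run hmem
    rw [runsOf_concat] at hmem
    unfold runStep at hmem
    split at hmem
    · rcases List.mem_append.mp hmem with h | h
      · have h' := ih run (List.mem_of_mem_dropLast h)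
        exact ⟨h'.1, fun r hr => List.mem_append_left _ (h'.2 r hr)⟩
      · have hrun : run = (runsOf l).getLastD [] ++ [i] := by simpa using h
        rename_i hc
        have hne : runsOf l ≠ [] := hc.1
        have hlast : (runsOf l).getLastD [] ∈ runsOf l := by
          rw [List.getLastD_eq_getLast?]
          rcases List.getLast?_eq_some_iff.mpr ⟨_, (List.dropLast_append_getLast hne).symm⟩ with h
          cases hh : (runsOf l).getLast? with
          | none => simp [List.getLast?_eq_none_iff] at hh; exact absurd hh hne
          | some x => simpa [hh] using List.mem_of_getLast? hh
        have h' := ih _ hlast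
        subst hrun
        refine ⟨by simp, fun r hr => ?_⟩
        rcases List.mem_append.mp hr with h2 | h2
        · exact List.mem_append_left _ (h'.2 r h2)
        · simp at h2; subst h2; exact List.mem_append_right _ (by simp)
    · rcases List.mem_append.mp hmem with h | h
      · have h' := ih run h
        exact ⟨h'.1, fun r hr => List.mem_append_left _ (h'.2 r hr)⟩
      · simp at h; subst h
        exact ⟨by simp, fun r hr => by simp at hr; subst hr; exact List.mem_append_right _ (by simp)⟩

theorem pvInt_88888 : pvInt "88888" = 88888 := by decide

theorem flush_eq (rs : List (List String)) (run : List String) (e : String)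
    (hrne : run ≠ []) (hecond : 2 ≤ run.length → e = run.getLastD "") :
    (if (run.length : Int) = 1 then strOf rs ++ run.getLastD "" ++ ","
     else if 1 < (run.length : Int) then strOf rs ++ run.headD "" ++ "-" ++ e ++ ","
     else strOf rs) = strOf (rs ++ [run]) := by
  rw [strOf_concat]
  by_cases h1 : run.length = 1
  · obtain ⟨x, hx⟩ := List.length_eq_one_iff.mp h1
    subst hx
    simp [fmtRun]
  · have h2 : 2 ≤ run.length := by
      have h0 : run.length ≠ 0 := fun h0 => hrne (List.length_eq_zero_iff.mp h0)
      omega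
    rw [if_neg (by exact_mod_cast h1), if_pos (by exact_mod_cast h2), hecond h2]
    rw [fmtRun, if_neg h1]
    simp [String.append_assoc]


theorem fmtStep_eq (ctns : Int) (last string start end_ i : String) :
    fmtStep (ctns, last, string, start, end_) i =
      if pvInt i = pvInt last + 1 then (ctns + 1, i, string, start, i)
      else (1, i,
        (if ctns = 1 then string ++ last ++ ","
         else if 1 < ctns then string ++ start ++ "-" ++ end_ ++ ","
         else string), i, end_) := rfl

-- loop invariant of fmt_string over a nonempty prefix whose first value is not 88889
theorem fmt_inv (l : List String) (hne : l ≠ []) (hhead : pvInt (l.headD "") ≠ 88889) :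
    ∃ rs run e, runsOf l = rs ++ [run] ∧ run ≠ [] ∧ run.getLastD "" = l.getLastD "" ∧
      l.foldl fmtStep (0, "88888", "", "", "") =
        ((run.length : Int), run.getLastD "", strOf rs, run.headD "", e) ∧
      (2 ≤ run.length → e = run.getLastD "") := by
  induction l using List.reverseRecOn with
  | nil => exact absurd rfl hne
  | append_singleton l i ih =>
    cases l with
    | nil =>
      refine ⟨[], [i], "", ?_, by simp, by simp, ?_, by simp⟩
      · simp [runsOf, runStep]
      · have hcond : ¬ (pvInt i = pvInt "88888" + 1) := by
          rw [pvInt_88888]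
          simpa using hhead
        simp [fmtStep, hcond, strOf]
    | cons a t =>
      have hl : (a :: t) ≠ [] := by simp
      have hh : pvInt ((a :: t).headD "") ≠ 88889 := by simpa using hhead
      obtain ⟨rs, run, e, hruns, hrne, hlast, hstate, hecond⟩ := ih hl hh
      rw [List.foldl_append, hstate, runsOf_concat, hruns]
      simp only [List.foldl_cons, List.foldl_nil]
      by_cases hc : pvInt i = pvInt (run.getLastD "") + 1
      · -- continuation: extend the last run
        have hrstep : runStep (rs ++ [run]) i = rs ++ [run ++ [i]] := by
          unfold runStep
          rw [if_pos ⟨by simp, by simpa using hc⟩]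
          simp
        refine ⟨rs, run ++ [i], i, hrstep, by simp, ?_, ?_, fun _ => List.getLastD_concat.symm⟩
        · rw [List.getLastD_concat, List.getLastD_concat]
        · rw [fmtStep_eq, if_pos hc]
          have h1 : (((run ++ [i]).length : Nat) : Int) = (run.length : Int) + 1 := by
            simp
          have h2 : (run ++ [i]).getLastD "" = i := List.getLastD_concat
          have h3 : (run ++ [i]).headD "" = run.headD "" := by
            cases run with
            | nil => exact absurd rfl hrne
            | cons _ _ => rfl
          rw [h1, h2, h3]
      · -- break: flush the last run, start a new one
        have hrstep : runStep (rs ++ [run]) i = (rs ++ [run]) ++ [[i]] := by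
          unfold runStep
          rw [if_neg]
          intro hcc
          exact hc (by simpa using hcc.2)
        have hflush := flush_eq rs run e hrne hecond
        refine ⟨rs ++ [run], [i], e, hrstep, by simp, by rw [List.getLastD_concat]; rfl, ?_, by simp⟩
        rw [fmtStep_eq, if_neg hc, hflush]
        rfl

-- ---- phase 3: the trailing-comma strip vs ','.join ----

theorem fmtRun_token (run : List String) (hrne : run ≠ []) (hcond : ∀ r ∈ run, pvCond r) :
    (fmtRun run).toList ≠ [] ∧ (fmtRun run).toList.getLast? ≠ some ',' := by
  have hhd : run.headD "" ∈ run := by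
    cases run with
    | nil => exact absurd rfl hrne
    | cons a t => simp
  have hgl : run.getLastD "" ∈ run := by
    rw [List.getLastD_eq_getLast?]
    cases hh : run.getLast? with
    | none => rw [List.getLast?_eq_none_iff] at hh; exact absurd hh hrne
    | some x => simpa using List.mem_of_getLast? hh
  unfold fmtRun
  split
  · obtain ⟨_, _, hcomma, hne⟩ := hcond _ hhd
    refine ⟨fun h => hne (String.toList_eq_nil_iff.mp h), fun h => hcomma (List.mem_of_getLast? h)⟩
  · obtain ⟨_, _, hcomma, hne⟩ := hcond _ hgl
    have hgl2 : (run.getLastD "").toList ≠ [] := fun h => hne (String.toList_eq_nil_iff.mp h)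
    obtain ⟨c, hc⟩ := Option.ne_none_iff_exists'.mp (fun h => hgl2 (List.getLast?_eq_none_iff.mp h))
    have hcm : c ≠ ',' := fun h => hcomma (List.mem_of_getLast? (h ▸ hc))
    constructor
    · rw [String.toList_append]
      exact fun h => hgl2 (List.append_eq_nil_iff.mp h).2
    · rw [String.toList_append, List.getLast?_append, hc]
      simpa using hcm

theorem flatten_commas : ∀ (ts : List (List Char)), ts ≠ [] →
    (ts.map (fun t => t ++ [','])).flatten = PySem.Chars.join [','] ts ++ [','] := by
  intro ts
  induction ts with
  | nil => intro h; exact absurd rfl h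
  | cons t ts ih =>
    intro _
    cases ts with
    | nil => simp [PySem.Chars.join_singleton]
    | cons t2 ts2 =>
      rw [PySem.Chars.join_cons_cons]
      simp only [List.map_cons, List.flatten_cons] at *
      rw [ih (by simp)]
      simp

theorem join_last : ∀ (ts : List (List Char)), ts ≠ [] →
    (∀ t ∈ ts, t ≠ [] ∧ t.getLast? ≠ some ',') →
    PySem.Chars.join [','] ts ≠ [] ∧ (PySem.Chars.join [','] ts).getLast? ≠ some ',' := by
  intro ts
  induction ts with
  | nil => intro h; exact absurd rfl h
  | cons t ts ih =>
    intro _ hall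
    cases ts with
    | nil =>
      rw [PySem.Chars.join_singleton]
      exact hall t (by simp)
    | cons t2 ts2 =>
      rw [PySem.Chars.join_cons_cons]
      obtain ⟨hne, hlast⟩ := ih (by simp) (fun x hx => hall x (List.mem_cons_of_mem _ hx))
      obtain ⟨c, hc⟩ := Option.ne_none_iff_exists'.mp (fun h => hne (List.getLast?_eq_none_iff.mp h))
      refine ⟨by simp, ?_⟩
      rw [List.getLast?_append, hc]
      simpa [hc] using hlast

theorem rstrip_concat (cs : List Char) (hne : cs ≠ []) (hlast : cs.getLast? ≠ some ',') :
    ((cs ++ [',']).reverse.dropWhile (fun c => c == ',')).reverse = cs := by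
  rw [List.reverse_append]
  simp only [List.reverse_cons, List.reverse_nil, List.nil_append, List.singleton_append]
  rw [List.dropWhile_cons, if_pos (by simp)]
  cases hrev : cs.reverse with
  | nil => exact absurd (by simpa using congrArg List.reverse hrev) hne
  | cons c rest =>
    have hc : cs.getLast? = some c := by
      rw [← List.head?_reverse, hrev]; rfl
    have hcne : (c == ',') = false := by
      simp only [beq_eq_false_iff_ne, ne_eq]
      intro h
      rw [h] at hc
      exact hlast hc
    rw [List.dropWhile_cons, if_neg (by simp [hcne]), ← hrev, List.reverse_reverse]

theorem strOf_toList : ∀ (rs : List (List String)),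
    (strOf rs).toList = ((rs.map (fun run => (fmtRun run).toList)).map (fun t => t ++ [','])).flatten := by
  intro rs
  induction rs using List.reverseRecOn with
  | nil => simp [strOf]
  | append_singleton rs run ih =>
    rw [strOf_concat]
    simp [String.toList_append, ih]

-- fmt_string(l) = ','.join(fmtRun over the runs of l), for nonempty l of usable roots
theorem fmt_main (l : List String) (hne : l ≠ []) (hcond : ∀ r ∈ l, pvCond r) :
    fmt_stringA l = PySem.Str.join "," ((l.foldl runStep []).map fmtRun) := by
  have hhd : l.headD "" ∈ l := by
    cases l with
    | nil => exact absurd rfl hne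
    | cons a t => simp
  have hhead : pvInt (l.headD "") ≠ 88889 := by
    obtain ⟨hs, h89, _, _⟩ := hcond _ hhd
    cases hv : PySem.Int.ofStr? (l.headD "") with
    | none => rw [hv] at hs; simp at hs
    | some v =>
      intro h
      rw [pvInt, hv] at h
      exact h89 (by rw [hv]; simpa using h)
  obtain ⟨rs, run, e, hruns, hrne, hlast, hstate, hecond⟩ := fmt_inv l hne hhead
  have hRcond : ∀ run' ∈ rs ++ [run], run' ≠ [] ∧ ∀ r ∈ run', pvCond r := by
    intro run' hm
    have := runs_shape l run' (hruns ▸ hm)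
    exact ⟨this.1, fun r hr => hcond r (this.2 r hr)⟩
  unfold fmt_stringA
  rw [List.foldl_append, hstate]
  simp only [List.foldl_cons, List.foldl_nil]
  rw [fmtStep_eq, if_neg (by rw [← hlast]; omega)]
  have hflush := flush_eq rs run e hrne hecond
  show rstripCommas (if (run.length : Int) = 1 then strOf rs ++ run.getLastD "" ++ ","
     else if 1 < (run.length : Int) then strOf rs ++ run.headD "" ++ "-" ++ e ++ ","
     else strOf rs) = _
  rw [hflush]
  -- both sides via toList
  have hfold : l.foldl runStep [] = rs ++ [run] := hruns
  rw [hfold]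
  apply String.toList_inj.mp
  have hts : ∀ t ∈ (rs ++ [run]).map (fun run => (fmtRun run).toList), t ≠ [] ∧ t.getLast? ≠ some ',' := by
    intro t ht
    obtain ⟨run', hrun', rfl⟩ := List.mem_map.mp ht
    exact fmtRun_token run' (hRcond run' hrun').1 (hRcond run' hrun').2
  have htsne : (rs ++ [run]).map (fun run => (fmtRun run).toList) ≠ [] := by simp
  obtain ⟨hjne, hjlast⟩ := join_last _ htsne hts
  rw [rstripCommas, String.toList_ofList, strOf_toList, flatten_commas _ htsne,
      rstrip_concat _ hjne hjlast, PySem.Str.toList_join, List.map_map]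
  rfl

-- ---- phase 4: per-key equality of the two formatted group names ----

theorem body_eq (k : String × String) (N : List String)
    (hcond : 2 ≤ N.length → ∀ r ∈ N, pvCond r) :
    (if N.length = 1 then k.1 ++ N.headD "" ++ k.2
     else k.1 ++ ("[" ++ fmt_stringA N ++ "]") ++ k.2)
    = (if N.length = 1 then k.1 ++ N.headD "" ++ k.2
       else k.1 ++ "[" ++ PySem.Str.join "," ((N.foldl runStep []).map fmtRun) ++ "]" ++ k.2) := by
  by_cases h1 : N.length = 1
  · simp [h1]
  · rw [if_neg h1, if_neg h1]
    cases hN : N with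
    | nil =>
      have h0 : fmt_stringA [] = "" := by decide
      have h0' : PySem.Str.join "," ((([] : List String).foldl runStep []).map fmtRun) = "" := rfl
      rw [h0, h0']
      simp [String.append_assoc]
    | cons a t =>
      have hNne : N ≠ [] := by rw [hN]; simp
      have h2 : 2 ≤ N.length := by
        have : N.length ≠ 0 := fun h => hNne (List.length_eq_zero_iff.mp h)
        omega
      rw [← hN]
      rw [fmt_main N hNne (hcond h2)]
      simp [String.append_assoc]

-- ===== VERDICT (by name: the statement is the Claim_ definition above) =====
theorem predo_it_spec : Claim_equal_predo_it := by
  intro lst pI sI m _ hpre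
  unfold Spec_predo_it
  have hinit : init_listA lst pI sI m =
      some (lst.foldl (fun d h => d.modify (pvKey pI sI m h) [] (fun l => l ++ [pvRoot pI sI m h])) PySem.Dict.empty) := by
    unfold init_listA
    rw [initStep_eq_bucketStep]
    exact bucket_fold_some pI sI m lst PySem.Dict.empty hpre.1
  have hinitB := bucket_fold_some pI sI m lst PySem.Dict.empty hpre.1
  unfold predo_it predo_it_alt
  rw [hinit, hinitB]
  dsimp only
  rw [PySem.List.foldl_append_singleton_eq_map, List.nil_append]
  apply List.map_congr_left
  intro k hk
  have hN : (lst.foldl (fun d h => d.modify (pvKey pI sI m h) [] (fun l => l ++ [pvRoot pI sI m h])) PySem.Dict.empty).getD k []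
      = (lst.filter (fun h => pvKey pI sI m h == k)).map (pvRoot pI sI m) := by
    simpa using getD_bucket_fold pI sI m k lst PySem.Dict.empty
  have hcond : 2 ≤ ((lst.foldl (fun d h => d.modify (pvKey pI sI m h) [] (fun l => l ++ [pvRoot pI sI m h])) PySem.Dict.empty).getD k []).length →
      ∀ r ∈ (lst.foldl (fun d h => d.modify (pvKey pI sI m h) [] (fun l => l ++ [pvRoot pI sI m h])) PySem.Dict.empty).getD k [], pvCond r := by
    rw [hN]
    intro h2 r hr
    obtain ⟨h', hh', rfl⟩ := List.mem_map.mp hr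
    obtain ⟨hmem, hkey⟩ := List.mem_filter.mp hh'
    have hkeq : pvKey pI sI m h' = k := by simpa using hkey
    apply hpre.2 h' hmem
    rw [hkeq]
    calc 2 ≤ ((lst.filter (fun h => pvKey pI sI m h == k)).map (pvRoot pI sI m)).length := h2
    _ = (lst.filter (fun h => pvKey pI sI m h == k)).length := by simp
  exact body_eq k _ hcond
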